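-- pv_equiv track=rewrite | github.com/mskozlova/advent_of_code | 2023/day09/day9_pt1.py | build_prediction_values
-- ===== SOURCE A (Python) =====
-- def build_prediction_values(value_history):
--     prediction_values = []
--     pyramid_last_layer = value_history
--
--     while not all(value == 0 for value in pyramid_last_layer):
--         prediction_values.append(pyramid_last_layer[-1])
--         pyramid_last_layer = [
--             value - prev_value
--             for value, prev_value in zip(
--                 pyramid_last_layer[1:], pyramid_last_layer[:-1]
--             )
--         ]
--
--     return prediction_values
-- ===== SOURCE B (Python) =====
-- def build_prediction_values(value_history):
--     # Single left-to-right pass maintaining the leading diagonal of the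
--     # difference pyramid: diag[k] is the last element of layer k of the
--     # prefix processed so far, allzero[k] records whether every element of
--     # layer k produced so far was zero.  No layer list is ever rebuilt.
--     diag = []
--     allzero = []
--     for x in value_history:
--         new_diag, new_flags = [], []
--         cur = x
--         for last, ok in zip(diag, allzero):
--             new_diag.append(cur)
--             new_flags.append(ok and cur == 0)
--             cur = cur - last
--         new_diag.append(cur)
--         new_flags.append(cur == 0)
--         diag, allzero = new_diag, new_flags
--     out = []
--     for last, ok in zip(diag, allzero):
--         if ok:
--             break
--         out.append(last)
--     return out
-- ===== Notes on version B (the rewrite author's own statement) =====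
-- stated objective: alternative
-- what changed: Replaces A's layer-by-layer reduction (rebuild the whole difference layer and test it for all-zero on every iteration) by a single left-to-right pass over the input that incrementally maintains the leading diagonal of the difference pyramid (last element of every layer) together with a per-layer all-zero flag, then reads the answer off the diagonal.
import Mathlib
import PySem

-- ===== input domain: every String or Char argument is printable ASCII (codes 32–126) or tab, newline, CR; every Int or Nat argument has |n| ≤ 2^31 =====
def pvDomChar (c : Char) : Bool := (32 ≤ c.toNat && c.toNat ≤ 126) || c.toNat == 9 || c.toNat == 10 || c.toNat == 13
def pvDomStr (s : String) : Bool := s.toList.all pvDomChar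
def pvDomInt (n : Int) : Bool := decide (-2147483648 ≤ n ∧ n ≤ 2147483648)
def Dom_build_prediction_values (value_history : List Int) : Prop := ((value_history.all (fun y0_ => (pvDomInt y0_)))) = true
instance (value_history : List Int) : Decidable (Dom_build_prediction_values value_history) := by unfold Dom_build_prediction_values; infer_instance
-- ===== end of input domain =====

-- B replaces A's layer-by-layer reduction by one left-to-right pass maintaining the pyramid's
-- leading diagonal plus per-layer all-zero flags (objective: alternative, same asymptotic cost).


-- ===== PORT A =====
-- while loop of A: accumulator 'prediction_values', layer replaced by zip-of-slices comprehension
def pvLoopA (prediction_values : List Int) (pyramid_last_layer : List Int) : List Int :=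
  if pyramid_last_layer.all (fun value => value == 0) then prediction_values
  else
    pvLoopA
      (prediction_values ++ [(PySem.List.pyGet? pyramid_last_layer (-1)).getD 0])
      -- pyramid_last_layer[1:] = drop 1, pyramid_last_layer[:-1] = dropLast
      (((pyramid_last_layer.drop 1).zip pyramid_last_layer.dropLast).map
        (fun vp => vp.1 - vp.2))
termination_by pyramid_last_layer.length
decreasing_by
  simp only [List.length_map, List.length_zip, List.length_drop, List.length_dropLast]
  cases pyramid_last_layer with
  | nil => simp_all
  | cons a t => simp

def build_prediction_values (value_history : List Int) : List Int :=
  pvLoopA [] value_history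

-- ===== PORT B =====
-- body of Source B's outer for-loop: extend the diagonal and the flags with the new value x
def pvStepB (st : List Int × List Bool) (x : Int) : List Int × List Bool :=
  let r := (st.1.zip st.2).foldl
    (fun (acc : List Int × List Bool × Int) (lp : Int × Bool) =>
      (acc.1 ++ [acc.2.2], acc.2.1 ++ [lp.2 && decide (acc.2.2 = 0)], acc.2.2 - lp.1))
    ([], [], x)
  (r.1 ++ [r.2.2], r.2.1 ++ [decide (r.2.2 = 0)])

-- Source B's final loop with break: take diagonal entries until the first all-zero layer
def pvOutB : List (Int × Bool) → List Int
  | [] => []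
  | (last, ok) :: t => if ok then [] else last :: pvOutB t

def build_prediction_values_alt (value_history : List Int) : List Int :=
  let st := value_history.foldl pvStepB ([], [])
  pvOutB (st.1.zip st.2)

-- ===== PRECONDITION & SPEC =====
def Spec_build_prediction_values (value_history : List Int) (out : List Int) : Prop := out = build_prediction_values_alt value_history
instance (value_history : List Int) (out : List Int) : Decidable (Spec_build_prediction_values value_history out) := by unfold Spec_build_prediction_values; infer_instance

-- ===== CLAIM (what is proved, stated in full; the proofs are below) =====
def Claim_equal_build_prediction_values : Prop := ∀ (value_history : List Int), Dom_build_prediction_values value_history → Spec_build_prediction_values value_history (build_prediction_values value_history)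

-- ===== LEMMAS AND PROOFS =====

-- the difference layer, exactly A's comprehension
def pvD (h : List Int) : List Int :=
  ((h.drop 1).zip h.dropLast).map (fun vp => vp.1 - vp.2)

theorem pvD_length (h : List Int) : (pvD h).length = h.length - 1 := by
  simp [pvD]

theorem pvD_getElem (h : List Int) (i : Nat) (hi : i < (pvD h).length) :
    (pvD h)[i] = h[i+1]'(by simp [pvD] at hi; omega) - h[i]'(by simp [pvD] at hi; omega) := by
  simp [pvD]

theorem pvD_iter_length (h : List Int) (k : Nat) : (pvD^[k] h).length = h.length - k := by
  induction k generalizing h with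
  | zero => simp
  | succ d ih =>
    rw [Function.iterate_succ_apply, ih, pvD_length]
    omega

theorem pvD_snoc (q : List Int) (hq : q ≠ []) (x : Int) :
    pvD (q ++ [x]) = pvD q ++ [x - q.getLastD 0] := by
  have hql : 0 < q.length := List.length_pos_iff.mpr hq
  have hL1 : (pvD (q ++ [x])).length = q.length := by rw [pvD_length]; simp
  have hL2 : (pvD q).length = q.length - 1 := pvD_length q
  apply List.ext_getElem (by simp [hL1, hL2]; omega)
  intro i h1 h2
  rw [pvD_getElem]
  rcases Nat.lt_or_ge i (q.length - 1) with hlt | hge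
  · rw [List.getElem_append_left (show i < (pvD q).length by omega), pvD_getElem,
      List.getElem_append_left (show i + 1 < q.length by omega),
      List.getElem_append_left (show i < q.length by omega)]
  · have hi : i = q.length - 1 := by rw [hL1] at h1; omega
    subst hi
    rw [List.getElem_append_right (show (pvD q).length ≤ q.length - 1 by omega),
      List.getElem_append_right (show q.length ≤ q.length - 1 + 1 by omega),
      List.getElem_append_left (show q.length - 1 < q.length by omega)]
    simp only [hL2, show q.length - 1 + 1 - q.length = 0 by omega,
      show q.length - 1 - (q.length - 1) = 0 by omega, List.getElem_singleton]
    rw [List.getLastD_eq_getLast?, List.getLast?_eq_getElem?,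
      List.getElem?_eq_getElem (by omega), Option.getD_some]

-- the 'cur' value passed down Source B's inner loop: new last element of layer k
def pvCur (p : List Int) (x : Int) : Nat → Int
  | 0 => x
  | k + 1 => pvCur p x k - (pvD^[k] p).getLastD 0

theorem pvD_iter_snoc (p : List Int) (x : Int) (k : Nat) (hk : k ≤ p.length) :
    pvD^[k] (p ++ [x]) = pvD^[k] p ++ [pvCur p x k] := by
  induction k with
  | zero => simp [pvCur]
  | succ d ih =>
    have hne : pvD^[d] p ≠ [] := by
      have := pvD_iter_length p d
      intro h; rw [h] at this; simp at this; omega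
    rw [Function.iterate_succ_apply', ih (by omega), pvD_snoc _ hne,
      Function.iterate_succ_apply', pvCur]

-- the diagonal and the flags of the full pyramid of h
def pvDiag (h : List Int) : List Int :=
  (List.range h.length).map (fun k => (pvD^[k] h).getLastD 0)

def pvFlag (h : List Int) : List Bool :=
  (List.range h.length).map (fun k => (pvD^[k] h).all (fun v => v == 0))

theorem pvCur_eq_getLastD (p : List Int) (x : Int) (k : Nat) (hk : k ≤ p.length) :
    (pvD^[k] (p ++ [x])).getLastD 0 = pvCur p x k := by
  rw [pvD_iter_snoc p x k hk, List.getLastD_eq_getLast?, List.getLast?_append]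
  simp

-- Source B's inner loop over the first n diagonal entries, characterised
theorem pvInner_eq (p : List Int) (x : Int) (n : Nat) (hn : n ≤ p.length) :
    (((List.range n).map (fun k => ((pvD^[k] p).getLastD 0, (pvD^[k] p).all (fun v => v == 0)))).foldl
      (fun (acc : List Int × List Bool × Int) (lp : Int × Bool) =>
        (acc.1 ++ [acc.2.2], acc.2.1 ++ [lp.2 && decide (acc.2.2 = 0)], acc.2.2 - lp.1))
      ([], [], x))
    = ((List.range n).map (fun k => pvCur p x k),
       (List.range n).map (fun k => (pvD^[k] p).all (fun v => v == 0) && decide (pvCur p x k = 0)),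
       pvCur p x n) := by
  induction n with
  | zero => simp [pvCur]
  | succ d ih =>
    rw [List.range_succ, List.map_append, List.foldl_append, ih (by omega)]
    simp [pvCur]

theorem zip_diag_flag (p : List Int) :
    (pvDiag p).zip (pvFlag p)
      = (List.range p.length).map
          (fun k => ((pvD^[k] p).getLastD 0, (pvD^[k] p).all (fun v => v == 0))) := by
  simp [pvDiag, pvFlag, List.zip_map']

theorem pvStepB_eq (p : List Int) (x : Int) :
    pvStepB (pvDiag p, pvFlag p) x = (pvDiag (p ++ [x]), pvFlag (p ++ [x])) := by
  unfold pvStepB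
  rw [zip_diag_flag, pvInner_eq p x p.length le_rfl]
  unfold pvDiag pvFlag
  simp only [List.length_append, List.length_singleton, List.range_succ, List.map_append,
    List.map_cons, List.map_nil, Prod.mk.injEq]
  refine ⟨?_, ?_⟩
  · congr 1
    · exact List.map_congr_left (fun k hk =>
        (pvCur_eq_getLastD p x k (le_of_lt (List.mem_range.mp hk))).symm)
    · rw [pvCur_eq_getLastD p x p.length le_rfl]
  · congr 1
    · refine List.map_congr_left (fun k hk => ?_)
      have hk' := List.mem_range.mp hk
      rw [pvD_iter_snoc p x k (le_of_lt hk'), List.all_append]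
      simp
      rfl
    · rw [pvD_iter_snoc p x p.length le_rfl]
      have : pvD^[p.length] p = [] := by
        have := pvD_iter_length p p.length
        cases h : pvD^[p.length] p with
        | nil => rfl
        | cons a t => rw [h] at this; simp at this
      rw [this]
      simp
      rfl

theorem foldB_eq (h : List Int) : h.foldl pvStepB ([], []) = (pvDiag h, pvFlag h) := by
  induction h using List.reverseRecOn with
  | nil => simp [pvDiag, pvFlag]
  | append_singleton p x ih => rw [List.foldl_append, List.foldl_cons, List.foldl_nil, ih, pvStepB_eq]

-- A's loop returns its accumulator on an all-zero layer
theorem pvLoopA_zero (acc h : List Int) (hall : h.all (fun value => value == 0)) :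
    pvLoopA acc h = acc := by
  rw [pvLoopA]; simp [hall]

-- A's accumulator is a pure prefix
theorem pvLoopA_acc (n : Nat) (acc h : List Int) (hn : h.length ≤ n) :
    pvLoopA acc h = acc ++ pvLoopA [] h := by
  induction n generalizing acc h with
  | zero =>
    have he : h = [] := by cases h <;> simp_all
    subst he
    rw [pvLoopA_zero _ _ (by simp), pvLoopA_zero _ _ (by simp)]
    simp
  | succ d ih =>
    by_cases hall : h.all (fun value => value == 0)
    · rw [pvLoopA_zero _ _ hall, pvLoopA_zero _ _ hall]
      simp
    · have hne : h ≠ [] := by intro he; subst he; simp at hall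
      have hl : 0 < h.length := List.length_pos_iff.mpr hne
      have hD : (((h.drop 1).zip h.dropLast).map (fun vp => vp.1 - vp.2)) = pvD h := rfl
      have hDl : (pvD h).length ≤ d := by rw [pvD_length]; omega
      rw [pvLoopA]
      conv_rhs => rw [pvLoopA]
      simp only [hall, Bool.false_eq_true, if_false, hD]
      rw [ih _ _ hDl, ih ([] ++ [(PySem.List.pyGet? h (-1)).getD 0]) _ hDl]
      simp

-- head decomposition of the diagonal/flags for nonempty h
theorem pvDiag_cons (h : List Int) (hne : h ≠ []) :
    pvDiag h = h.getLastD 0 :: pvDiag (pvD h) := by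
  have hl : 0 < h.length := List.length_pos_iff.mpr hne
  unfold pvDiag
  rw [show h.length = (h.length - 1) + 1 by omega, List.range_succ_eq_map]
  simp only [List.map_cons, Function.iterate_zero_apply, List.map_map]
  rw [pvD_length]
  congr 1

theorem pvFlag_cons (h : List Int) (hne : h ≠ []) :
    pvFlag h = (h.all (fun v => v == 0)) :: pvFlag (pvD h) := by
  have hl : 0 < h.length := List.length_pos_iff.mpr hne
  unfold pvFlag
  rw [show h.length = (h.length - 1) + 1 by omega, List.range_succ_eq_map]
  simp only [List.map_cons, Function.iterate_zero_apply, List.map_map]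
  rw [pvD_length]
  congr 1

theorem pvOut_eq_loopA (n : Nat) (h : List Int) (hn : h.length ≤ n) :
    pvOutB ((pvDiag h).zip (pvFlag h)) = pvLoopA [] h := by
  induction n generalizing h with
  | zero =>
    have : h = [] := by cases h <;> simp_all
    subst this
    rw [pvLoopA]; simp [pvDiag, pvFlag, pvOutB]
  | succ d ih =>
    rw [pvLoopA]
    by_cases hall : h.all (fun value => value == 0)
    · rcases h with _ | ⟨a, t⟩
      · simp [pvDiag, pvFlag, pvOutB]
      · rw [pvDiag_cons _ (by simp), pvFlag_cons _ (by simp)]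
        simp only [List.zip_cons_cons, pvOutB, hall, if_true]
    · have hne : h ≠ [] := by intro he; subst he; simp at hall
      have hl : 0 < h.length := List.length_pos_iff.mpr hne
      rw [pvDiag_cons _ hne, pvFlag_cons _ hne]
      simp only [List.zip_cons_cons, pvOutB, hall, Bool.false_eq_true, if_false]
      have hD : (((h.drop 1).zip h.dropLast).map (fun vp => vp.1 - vp.2)) = pvD h := rfl
      have hv : (PySem.List.pyGet? h (-1)).getD 0 = h.getLastD 0 := by
        rw [PySem.List.pyGet?_neg_one, List.getLastD_eq_getLast?]
      rw [hD, hv, ih (pvD h) (by rw [pvD_length]; omega),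
        pvLoopA_acc (d+1) ([] ++ [h.getLastD 0]) (pvD h) (by rw [pvD_length]; omega)]
      simp [List.getLastD_eq_getLast?]

-- ===== VERDICT (by name: the statement is the Claim_ definition above) =====
theorem build_prediction_values_spec : Claim_equal_build_prediction_values := by
  intro value_history _
  unfold Spec_build_prediction_values build_prediction_values build_prediction_values_alt
  rw [foldB_eq]
  exact (pvOut_eq_loopA value_history.length value_history le_rfl).symm
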